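-- pv_equiv track=rewrite | github.com/msg-bq/semantic_parsing | generate_dataset/parse_funcs/_parse_derivation_conic10k.py | __merge_variables
-- ===== SOURCE A (Python) =====
-- def __merge_variables(variables_list: list[str]) -> list[str]:
--     merged_list = []
--     temp_buffer = []
--     open_count = 0  # 跟踪未闭合的括号数量
--
--     for item in variables_list:
--         # 计算当前项的括号数量
--         open_count += item.count('(') - item.count(')')
--
--         # 添加到缓冲区
--         temp_buffer.append(item)
--
--         # 如果所有括号都已闭合
--         if open_count == 0:
--             # 合并缓冲区内容
--             merged_item = ''.join([s if i == 0 else f', {s}'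
--                                    for i, s in enumerate(temp_buffer)])
--             merged_list.append(merged_item)
--             temp_buffer = []
--
--     # 处理最后可能未闭合的括号
--     if temp_buffer:
--         merged_list.append(''.join(temp_buffer))
--
--     return merged_list
-- ===== SOURCE B (Python) =====
-- def __merge_variables(variables_list: list[str]) -> list[str]:
--     merged = []
--     n = len(variables_list)
--     start = 0
--     while start < n:
--         balance = 0
--         cut = None
--         for i in range(start, n):
--             item = variables_list[i]
--             balance += item.count('(') - item.count(')')
--             if balance == 0:
--                 cut = i
--                 break
--         if cut is None:
--             merged.append(''.join(variables_list[start:]))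
--             break
--         merged.append(', '.join(variables_list[start:cut + 1]))
--         start = cut + 1
--     return merged
-- ===== Notes on version B (the rewrite author's own statement) =====
-- stated objective: alternative
-- what changed: Replaces A's streaming fold that accumulates a temp buffer and flushes it (via an enumerate-based join) whenever the running parenthesis balance hits zero with a split-first recursion: scan for the first index where the cumulative balance returns to zero, slice off that group and ', '-join it, recurse on the remainder, and ''-join any unclosed tail.
import Mathlib
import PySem

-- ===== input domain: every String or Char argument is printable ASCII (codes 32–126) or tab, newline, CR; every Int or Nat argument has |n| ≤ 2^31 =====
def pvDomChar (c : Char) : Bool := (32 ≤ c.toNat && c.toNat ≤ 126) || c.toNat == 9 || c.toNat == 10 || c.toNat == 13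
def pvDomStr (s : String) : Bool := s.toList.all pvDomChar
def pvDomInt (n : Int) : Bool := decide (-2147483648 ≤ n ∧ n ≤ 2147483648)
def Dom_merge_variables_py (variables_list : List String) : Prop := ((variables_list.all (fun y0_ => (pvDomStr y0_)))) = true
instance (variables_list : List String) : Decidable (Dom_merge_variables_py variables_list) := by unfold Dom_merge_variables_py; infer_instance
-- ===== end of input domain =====

-- B replaces A's streaming flush-on-zero buffer by a split-off-the-first-balanced-group
-- recursion (scan for the first zero-balance cut, slice, recurse on the remainder): 'alternative' objective, same cost.

-- item.count('(') - item.count(')'), used by both Pythons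
def pvBal (s : String) : Int := (PySem.Str.count s "(" : Int) - (PySem.Str.count s ")" : Int)

-- ===== PORT A =====
-- ''.join([s if i == 0 else f', {s}' for i, s in enumerate(temp_buffer)])
def pvJoinEnum (buf : List String) : String :=
  PySem.Str.join "" ((PySem.List.enumerate buf).map (fun p => if p.1 = 0 then p.2 else ", " ++ p.2))

-- the for-loop of A, carrying (merged_list, temp_buffer, open_count); the [],-case is the post-loop tail flush
def merge_variables_py_go : List String → List String → List String → Int → List String
  | [], merged, buf, _ => if buf ≠ [] then merged ++ [PySem.Str.join "" buf] else merged
  | item :: rest, merged, buf, cnt =>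
    let cnt' := cnt + pvBal item
    let buf' := buf ++ [item]
    if cnt' = 0 then
      merge_variables_py_go rest (merged ++ [pvJoinEnum buf']) [] 0
    else
      merge_variables_py_go rest merged buf' cnt'

def merge_variables_py (variables_list : List String) : List String :=
  merge_variables_py_go variables_list [] [] 0

-- ===== PORT B =====
-- the inner for-loop of B: first index where the running balance hits 0, returned as the slices
-- (rest[:cut+1], rest[cut+1:]); none = cut is None
def pvSplitZero (c : Int) : List String → Option (List String × List String)
  | [] => none
  | x :: rs =>
    let c' := c + pvBal x
    if c' = 0 then some ([x], rs)
    else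
      match pvSplitZero c' rs with
      | none => none
      | some (g, r) => some (x :: g, r)

theorem pvSplitZero_length : ∀ (l : List String) (c : Int) {g r : List String},
    pvSplitZero c l = some (g, r) → l.length = g.length + r.length ∧ 0 < g.length := by
  intro l
  induction l with
  | nil => intro c g r h; simp [pvSplitZero] at h
  | cons x xs ih =>
    intro c g r h
    simp only [pvSplitZero] at h
    by_cases hc : c + pvBal x = 0
    · rw [if_pos hc] at h
      cases h
      simp [Nat.add_comm]
    · rw [if_neg hc] at h
      cases hrec : pvSplitZero (c + pvBal x) xs with
      | none => rw [hrec] at h; cases h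
      | some gr =>
        obtain ⟨g', r'⟩ := gr
        rw [hrec] at h
        cases h
        have := ih (c + pvBal x) hrec
        simp only [List.length_cons]
        omega

-- the while-loop of B
def merge_variables_py_alt_go (l : List String) : List String :=
  match h : pvSplitZero 0 l with
  | none => if l = [] then [] else [PySem.Str.join "" l]
  | some (g, r) => PySem.Str.join ", " g :: merge_variables_py_alt_go r
termination_by l.length
decreasing_by
  have := pvSplitZero_length l 0 h
  omega

def merge_variables_py_alt (variables_list : List String) : List String :=
  merge_variables_py_alt_go variables_list

-- ===== PRECONDITION & SPEC =====
def Spec_merge_variables_py (variables_list : List String) (out : List String) : Prop := out = merge_variables_py_alt variables_list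
instance (variables_list : List String) (out : List String) : Decidable (Spec_merge_variables_py variables_list out) := by unfold Spec_merge_variables_py; infer_instance

-- ===== CLAIM (what is proved, stated in full; the proofs are below) =====
def Claim_equal_merge_variables_py : Prop := ∀ (variables_list : List String), Dom_merge_variables_py variables_list → Spec_merge_variables_py variables_list (merge_variables_py variables_list)

-- ===== LEMMAS AND PROOFS =====

-- sum of balances over a list
def pvBalL (l : List String) : Int := (l.map pvBal).sum

theorem pvBalL_append (a b : List String) : pvBalL (a ++ b) = pvBalL a + pvBalL b := by
  simp [pvBalL]

-- Chars-level: pull a prefix of the first piece out of a join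
theorem pvJoin_cons_append (sep a b : List Char) (ys : List (List Char)) :
    PySem.Chars.join sep ((a ++ b) :: ys) = a ++ PySem.Chars.join sep (b :: ys) := by
  cases ys with
  | nil => simp [PySem.Chars.join_singleton]
  | cons z zs => simp [PySem.Chars.join_cons_cons, List.append_assoc]

-- Chars-level: ''-join with ', ' glued onto each later piece IS the ', '-join
theorem pvJoin_empty_eq_comma (x : List Char) (xs : List (List Char)) :
    PySem.Chars.join [] (x :: xs.map (fun s => (", ".toList) ++ s)) =
      PySem.Chars.join (", ".toList) (x :: xs) := by
  induction xs generalizing x with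
  | nil => rfl
  | cons y ys ih =>
    rw [List.map_cons, PySem.Chars.join_cons_cons, List.append_nil,
        ih ((", ".toList) ++ y), pvJoin_cons_append, PySem.Chars.join_cons_cons,
        List.append_assoc]

-- the enumerate-map of A with a nonzero start is a plain ', '-prefix map
theorem pvEnum_map (xs : List String) : ∀ (s : Int), 1 ≤ s →
    (PySem.List.enumerate xs s).map (fun p => if p.1 = 0 then p.2 else ", " ++ p.2) =
      xs.map (fun t => ", " ++ t) := by
  induction xs with
  | nil => intro s _; rfl
  | cons x xt ih =>
    intro s hs
    rw [PySem.List.enumerate_cons, List.map_cons, List.map_cons, if_neg (by omega), ih (s + 1) (by omega)]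

-- A's enumerate-join equals Python's ', '.join
theorem pvJoinEnum_eq (buf : List String) : pvJoinEnum buf = PySem.Str.join ", " buf := by
  cases buf with
  | nil => rfl
  | cons x xs =>
    apply String.toList_inj.mp
    rw [pvJoinEnum, PySem.List.enumerate_cons, List.map_cons, if_pos rfl,
        pvEnum_map xs (0 + 1) (by norm_num), PySem.Str.toList_join, PySem.Str.toList_join]
    simp only [List.map_cons, List.map_map]
    have : List.map (String.toList ∘ fun t => ", " ++ t) xs
        = (xs.map String.toList).map (fun s => (", ".toList) ++ s) := by
      simp [Function.comp, List.map_map]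
    rw [show ("" : String).toList = ([] : List Char) from rfl, this,
        pvJoin_empty_eq_comma]

-- splitting past a prefix none of whose nonempty prefixes balances to zero
theorem pvSplitZero_append (buf : List String) : ∀ (c : Int) (rest : List String),
    (∀ p, p ≠ [] → p <+: buf → c + pvBalL p ≠ 0) →
    pvSplitZero c (buf ++ rest) =
      (pvSplitZero (c + pvBalL buf) rest).map (fun gr => (buf ++ gr.1, gr.2)) := by
  induction buf with
  | nil =>
    intro c rest _
    simp [pvBalL]
  | cons y b ih =>
    intro c rest hinv
    have hy : c + pvBal y ≠ 0 := by
      have := hinv [y] (by simp) ⟨b, rfl⟩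
      simpa [pvBalL] using this
    have hrec := ih (c + pvBal y) rest (by
      intro p hp hpre
      have := hinv (y :: p) (by simp) (by
        obtain ⟨t, ht⟩ := hpre
        exact ⟨t, by simp [← ht]⟩)
      simpa [pvBalL, add_assoc] using this)
    show pvSplitZero c (y :: (b ++ rest)) = _
    rw [pvSplitZero]
    simp only [if_neg hy, hrec]
    have : c + pvBal y + pvBalL b = c + pvBalL (y :: b) := by
      simp [pvBalL]; ring
    rw [this]
    cases pvSplitZero (c + pvBalL (y :: b)) rest with
    | none => rfl
    | some gr => rfl

-- no nonempty prefix balances to zero → the scan finds no cut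
theorem pvSplitZero_none (l : List String) : ∀ (c : Int),
    (∀ p, p ≠ [] → p <+: l → c + pvBalL p ≠ 0) → pvSplitZero c l = none := by
  induction l with
  | nil => intro c _; rfl
  | cons x xs ih =>
    intro c hinv
    have hx : c + pvBal x ≠ 0 := by
      have := hinv [x] (by simp) ⟨xs, rfl⟩
      simpa [pvBalL] using this
    rw [pvSplitZero]
    simp only [if_neg hx]
    rw [ih (c + pvBal x) (by
      intro p hp hpre
      have := hinv (x :: p) (by simp) (by
        obtain ⟨t, ht⟩ := hpre
        exact ⟨t, by simp [← ht]⟩)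
      simpa [pvBalL, add_assoc] using this)]

-- unfolding the two branches of B's while-loop
theorem alt_go_none {l : List String} (h : pvSplitZero 0 l = none) :
    merge_variables_py_alt_go l = if l = [] then [] else [PySem.Str.join "" l] := by
  rw [merge_variables_py_alt_go]
  split <;> simp_all

theorem alt_go_some {l g r : List String} (h : pvSplitZero 0 l = some (g, r)) :
    merge_variables_py_alt_go l = PySem.Str.join ", " g :: merge_variables_py_alt_go r := by
  rw [merge_variables_py_alt_go]
  split <;> simp_all

-- the loop invariant: A's loop from a buffer none of whose nonempty prefixes balances to zero
-- computes merged ++ B on buffer ++ rest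
theorem pv_key (rest : List String) : ∀ (buf merged : List String),
    (∀ p, p ≠ [] → p <+: buf → pvBalL p ≠ 0) →
    merge_variables_py_go rest merged buf (pvBalL buf) =
      merged ++ merge_variables_py_alt_go (buf ++ rest) := by
  induction rest with
  | nil =>
    intro buf merged hinv
    have hnone : pvSplitZero 0 buf = none :=
      pvSplitZero_none buf 0 (by intro p hp hpre; simpa using hinv p hp hpre)
    rw [merge_variables_py_go, List.append_nil, alt_go_none hnone]
    by_cases hb : buf = []
    · subst hb; simp
    · simp [hb]
  | cons x rs ih =>
    intro buf merged hinv
    have hsplit := pvSplitZero_append buf 0 (x :: rs)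
      (by intro p hp hpre; simpa using hinv p hp hpre)
    rw [zero_add] at hsplit
    rw [merge_variables_py_go]
    by_cases h0 : pvBalL buf + pvBal x = 0
    · rw [if_pos h0]
      have hih := ih [] (merged ++ [pvJoinEnum (buf ++ [x])])
        (by intro p hp hpre; simp at hpre; exact absurd hpre hp)
      rw [show (0 : Int) = pvBalL [] from rfl, hih]
      have hval : pvSplitZero 0 (buf ++ x :: rs) = some (buf ++ [x], rs) := by
        rw [hsplit]
        have : pvSplitZero (pvBalL buf) (x :: rs) = some ([x], rs) := by
          simp only [pvSplitZero]
          rw [if_pos (by simpa [pvBalL] using h0)]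
        rw [this]
        rfl
      rw [alt_go_some hval, pvJoinEnum_eq]
      simp
    · rw [if_neg h0]
      have hbal : pvBalL buf + pvBal x = pvBalL (buf ++ [x]) := by
        rw [pvBalL_append]; simp [pvBalL]
      rw [hbal]
      have hih := ih (buf ++ [x]) merged (by
        intro p hp hpre
        rcases List.prefix_concat_iff.mp hpre with h | h
        · subst h; rw [← hbal]; exact h0
        · exact hinv p hp h)
      rw [hih]
      simp

-- ===== VERDICT (by name: the statement is the Claim_ definition above) =====
theorem merge_variables_py_spec : Claim_equal_merge_variables_py := by
  intro l _
  show merge_variables_py l = merge_variables_py_alt l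
  have := pv_key l [] [] (by intro p hp hpre; simp at hpre; exact absurd hpre hp)
  simpa [merge_variables_py, merge_variables_py_alt, pvBalL] using this
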